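-- pv_equiv track=rewrite | github.com/Jouzss/Arquitectura-de-computadoras | Practica_Laboratorios/Lab12/labj/pregunta3.py | par_num_primos
-- ===== SOURCE A (Python) =====
-- def es_primo(num):
--     for n in range(2, num):
--         if num % n == 0:
--             return False
--     return True
--
-- def par_num_primos(n):
--     cant = 0
--
--     for i in range(2, n):
--         if ((es_primo(i)) and (cant == 0)):
--             if((n%i) == 0):
--                 primo_1 = i
--                 cant = 1
--         elif((es_primo(i)) and (cant == 1)):
--             if((n%i) == 0):
--                 primo_2 = i
--                 return [primo_1, primo_2]
-- ===== SOURCE B (Python) =====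
-- def par_num_primos(n):
--     # Trial division up to sqrt: find the smallest prime factor, strip it,
--     # then take the smallest prime factor of what remains.
--     if n < 2:
--         return None
--     m = n
--     d = 2
--     while d * d <= m:
--         if m % d == 0:
--             p1 = d
--             while m % d == 0:
--                 m //= d
--             if m == 1:
--                 return None
--             e = 2
--             while e * e <= m:
--                 if m % e == 0:
--                     return [p1, e]
--                 e += 1
--             return [p1, m]
--         d += 1
--     return None
-- ===== Notes on version B (the rewrite author's own statement) =====
-- stated objective: faster
-- what changed: A scans every i < n and calls a quadratic primality test on each; B does trial division only up to sqrt(n): it finds the smallest prime factor, strips it out, and takes the smallest prime factor of the remainder.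
import Mathlib
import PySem

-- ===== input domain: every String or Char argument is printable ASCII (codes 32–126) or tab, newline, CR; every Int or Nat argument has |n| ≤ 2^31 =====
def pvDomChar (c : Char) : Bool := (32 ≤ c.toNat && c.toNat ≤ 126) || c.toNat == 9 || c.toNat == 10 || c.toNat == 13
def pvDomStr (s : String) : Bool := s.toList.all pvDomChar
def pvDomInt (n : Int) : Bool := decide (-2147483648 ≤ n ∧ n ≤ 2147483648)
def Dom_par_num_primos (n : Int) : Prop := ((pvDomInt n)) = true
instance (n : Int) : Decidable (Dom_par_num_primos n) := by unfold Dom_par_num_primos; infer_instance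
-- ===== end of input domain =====

-- B replaces A's O(n^2) scan over all i < n by trial division up to sqrt(n):
-- find the smallest prime factor, strip it out, take the smallest prime factor of the rest.

-- ===== PORT A =====
-- es_primo: first k in range(2, num) dividing num -> False, else True
def es_primo (num : Int) : Bool :=
  ((PySem.List.pyRange 2 num 1).find? (fun k => PySem.Int.mod num k == 0)).isNone

-- the for-loop of par_num_primos: state cant (0/1) and primo_1 (read only after cant = 1)
def parLoop (n : Int) : List Int → Int → Int → Option (List Int)
  | [], _, _ => none
  | i :: rest, cant, p1 =>
    if es_primo i && cant == 0 then
      if PySem.Int.mod n i == 0 then parLoop n rest 1 i else parLoop n rest cant p1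
    else if es_primo i && cant == 1 then
      if PySem.Int.mod n i == 0 then some [p1, i] else parLoop n rest cant p1
    else parLoop n rest cant p1

def par_num_primos (n : Int) : Option (List Int) :=
  parLoop n (PySem.List.pyRange 2 n 1) 0 0

-- ===== PORT B =====
-- inner loop of Source B: 'e = 2; while e*e <= m: if m % e == 0: return e; e += 1; return m'
-- (Nat is exact here: Source B only runs these loops on positive ints)
def spfFrom (m : Nat) (d : Nat) : Nat :=
  if _h : d * d ≤ m then
    if m % d == 0 then d else spfFrom m (d + 1)
  else m
termination_by m + 2 - d
decreasing_by
  rcases Nat.eq_zero_or_pos d with h0 | h1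
  · omega
  · have : d ≤ d * d := Nat.le_mul_of_pos_left d h1
    omega

-- 'while m % d == 0: m //= d' (the ≤/positivity side conditions only make termination evident)
def stripFactor (m : Nat) (d : Nat) : Nat :=
  if _h : m % d == 0 ∧ 2 ≤ d ∧ 1 ≤ m then stripFactor (m / d) d else m
termination_by m
decreasing_by
  exact Nat.div_lt_self (by omega) (by omega)

-- 'd = 2; while d*d <= m: if m % d == 0: …; d += 1; return None'
def outerLoop (m : Nat) (d : Nat) : Option (List Int) :=
  if _h : d * d ≤ m then
    if m % d == 0 then
      let m' := stripFactor m d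
      if m' == 1 then none
      else some [(d : Int), (spfFrom m' 2 : Int)]
    else outerLoop m (d + 1)
  else none
termination_by m + 2 - d
decreasing_by
  rcases Nat.eq_zero_or_pos d with h0 | h1
  · omega
  · have : d ≤ d * d := Nat.le_mul_of_pos_left d h1
    omega

def par_num_primos_alt (n : Int) : Option (List Int) :=
  if n < 2 then none else outerLoop n.toNat 2

-- ===== PRECONDITION & SPEC =====
def Spec_par_num_primos (n : Int) (out : Option (List Int)) : Prop := out = par_num_primos_alt n
instance (n : Int) (out : Option (List Int)) : Decidable (Spec_par_num_primos n out) := by unfold Spec_par_num_primos; infer_instance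

-- ===== CLAIM (what is proved, stated in full; the proofs are below) =====
def Claim_equal_par_num_primos : Prop := ∀ (n : Int), Dom_par_num_primos n → Spec_par_num_primos n (par_num_primos n)

-- ===== LEMMAS AND PROOFS =====

-- the loop's acceptance test: i is prime and divides n
def pvPred (n i : Int) : Bool := es_primo i && (PySem.Int.mod n i == 0)

theorem parLoop_one (n p : Int) (l : List Int) :
    parLoop n l 1 p =
      (match l.filter (pvPred n) with
       | b :: _ => some [p, b]
       | [] => none) := by
  induction l with
  | nil => rfl
  | cons i rest ih =>
    by_cases hp : es_primo i = true
    · by_cases hm : PySem.Int.mod n i == 0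
      · simp [parLoop, List.filter, pvPred, hp, hm]
      · simp [parLoop, List.filter, pvPred, hp, hm, ih]
    · simp [parLoop, List.filter, pvPred, hp, ih]

theorem parLoop_zero (n p0 : Int) (l : List Int) :
    parLoop n l 0 p0 =
      (match l.filter (pvPred n) with
       | a :: b :: _ => some [a, b]
       | _ => none) := by
  induction l generalizing p0 with
  | nil => rfl
  | cons i rest ih =>
    by_cases hp : es_primo i = true
    · by_cases hm : PySem.Int.mod n i == 0
      · simp only [parLoop, hp, hm, Bool.and_self, beq_self_eq_true, Bool.true_and, if_pos]
        rw [parLoop_one]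
        simp [List.filter, pvPred, hp, hm]
        cases rest.filter (pvPred n) <;> rfl
      · simp [parLoop, List.filter, pvPred, hp, hm, ih]
    · simp [parLoop, List.filter, pvPred, hp, ih]

theorem es_primo_iff (i : Int) (h2 : 2 ≤ i) : es_primo i = true ↔ Nat.Prime i.toNat := by
  unfold es_primo
  rw [Option.isNone_iff_eq_none, List.find?_eq_none]
  constructor
  · intro h
    rw [Nat.prime_def_lt']
    refine ⟨by omega, fun m hm2 hmi hdvd => ?_⟩
    have hmem : (m : Int) ∈ PySem.List.pyRange 2 i 1 := by
      rw [PySem.List.mem_pyRange_one]; omega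
    have hdvd' : (m : Int) ∣ i := by
      have := Int.natCast_dvd_natCast.mpr hdvd
      rwa [Int.toNat_of_nonneg (by omega)] at this
    have := h _ hmem
    rw [beq_iff_eq, PySem.Int.mod_eq_zero_iff_dvd] at this
    exact this hdvd'
  · intro hp x hx
    rw [PySem.List.mem_pyRange_one] at hx
    simp only [beq_iff_eq, PySem.Int.mod_eq_zero_iff_dvd]
    intro hdvd
    have hxd : x.toNat ∣ i.toNat := by
      rwa [← Int.toNat_of_nonneg (show (0:Int) ≤ x by omega),
        ← Int.toNat_of_nonneg (show (0:Int) ≤ i by omega), Int.natCast_dvd_natCast] at hdvd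
    exact (Nat.prime_def_lt'.mp hp).2 x.toNat (by omega) (by omega) hxd

theorem pvPred_iff (n i : Int) (h2 : 2 ≤ i) (hn : 0 ≤ n) :
    pvPred n i = true ↔ (Nat.Prime i.toNat ∧ i.toNat ∣ n.toNat) := by
  unfold pvPred
  rw [Bool.and_eq_true, es_primo_iff i h2, beq_iff_eq, PySem.Int.mod_eq_zero_iff_dvd]
  constructor
  · rintro ⟨h1, h3⟩
    refine ⟨h1, ?_⟩
    rwa [← Int.toNat_of_nonneg (show (0:Int) ≤ i by omega),
      ← Int.toNat_of_nonneg hn, Int.natCast_dvd_natCast] at h3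
  · rintro ⟨h1, h3⟩
    refine ⟨h1, ?_⟩
    have := Int.natCast_dvd_natCast.mpr h3
    rwa [Int.toNat_of_nonneg (show (0:Int) ≤ i by omega), Int.toNat_of_nonneg hn] at this

theorem spfFrom_eq_minFac (m : Nat) (hm : 2 ≤ m) :
    ∀ k d, m + 2 - d ≤ k → 2 ≤ d → d ≤ m.minFac → spfFrom m d = m.minFac := by
  intro k
  induction k with
  | zero =>
    intro d hk hd hle
    have := Nat.minFac_le (show 0 < m by omega)
    omega
  | succ k ih =>
    intro d hk hd hle
    rw [spfFrom]
    split
    · rename_i hdd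
      by_cases hdvd : m % d = 0
      · have h1 : m.minFac ≤ d := Nat.minFac_le_of_dvd hd (Nat.dvd_of_mod_eq_zero hdvd)
        simp [hdvd]; omega
      · have hne : d ≠ m.minFac := by
          intro h
          exact hdvd ((Nat.dvd_iff_mod_eq_zero).mp (h ▸ Nat.minFac_dvd m))
        simp only [hdvd, beq_iff_eq, if_false]
        exact ih (d + 1) (by omega) (by omega) (by omega)
    · rename_i hdd
      by_cases hp : Nat.Prime m
      · exact hp.minFac_eq.symm
      · exfalso
        have h2 := Nat.minFac_sq_le_self (by omega) hp
        have h3 : d * d ≤ m.minFac * m.minFac := Nat.mul_le_mul hle hle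
        have h4 : m.minFac * m.minFac ≤ m := by rwa [← pow_two]
        omega

theorem stripFactor_dvd (m d : Nat) : stripFactor m d ∣ m := by
  induction m using Nat.strong_induction_on with
  | _ m ih =>
    rw [stripFactor]
    split
    · rename_i h
      obtain ⟨h1, h2, h3⟩ := h
      have hdvd : d ∣ m := Nat.dvd_of_mod_eq_zero (by simpa using h1)
      exact dvd_trans (ih (m / d) (Nat.div_lt_self (by omega) (by omega)))
        (Nat.div_dvd_of_dvd hdvd)
    · exact dvd_rfl

theorem stripFactor_pos (m d : Nat) (hm : 1 ≤ m) : 1 ≤ stripFactor m d :=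
  Nat.pos_of_dvd_of_pos (stripFactor_dvd m d) hm

theorem stripFactor_not_dvd (m d : Nat) (hd : 2 ≤ d) (hm : 1 ≤ m) :
    ¬ d ∣ stripFactor m d := by
  induction m using Nat.strong_induction_on with
  | _ m ih =>
    rw [stripFactor]
    split
    · rename_i h
      obtain ⟨h1, h2, h3⟩ := h
      have hdvd : d ∣ m := Nat.dvd_of_mod_eq_zero (by simpa using h1)
      have hge : d ≤ m := Nat.le_of_dvd (by omega) hdvd
      exact ih (m / d) (Nat.div_lt_self (by omega) (by omega))
        (by have := Nat.div_le_div_right (c := d) hge; rw [Nat.div_self (by omega)] at this; omega)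
    · rename_i h
      intro hdvd
      exact h ⟨by simpa using (Nat.dvd_iff_mod_eq_zero).mp hdvd, hd, hm⟩

theorem dvd_stripFactor (q m d : Nat) (hq : Nat.Prime q) (hd : Nat.Prime d)
    (hne : q ≠ d) (hqm : q ∣ m) : q ∣ stripFactor m d := by
  induction m using Nat.strong_induction_on with
  | _ m ih =>
    rw [stripFactor]
    split
    · rename_i h
      obtain ⟨h1, h2, h3⟩ := h
      have hdvd : d ∣ m := Nat.dvd_of_mod_eq_zero (by simpa using h1)
      have hco : Nat.Coprime q d := (Nat.coprime_primes hq hd).mpr hne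
      have hq' : q ∣ m / d := by
        refine hco.dvd_of_dvd_mul_right ?_
        rwa [Nat.div_mul_cancel hdvd]
      exact ih (m / d) (Nat.div_lt_self (by omega) (by omega)) hq'
    · exact hqm

-- the value B computes, in closed form
def pvBres (m : Nat) : Option (List Int) :=
  if 2 ≤ m ∧ ¬ Nat.Prime m then
    if stripFactor m m.minFac = 1 then none
    else some [(m.minFac : Int), ((stripFactor m m.minFac).minFac : Int)]
  else none

theorem outerLoop_eq (m : Nat) (hm : 2 ≤ m) :
    ∀ k d, m + 2 - d ≤ k → 2 ≤ d → d ≤ m.minFac → outerLoop m d = pvBres m := by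
  intro k
  induction k with
  | zero =>
    intro d hk hd hle
    have := Nat.minFac_le (show 0 < m by omega)
    omega
  | succ k ih =>
    intro d hk hd hle
    rw [outerLoop]
    split
    · rename_i hdd
      by_cases hdvd : m % d = 0
      · have h1 : m.minFac ≤ d := Nat.minFac_le_of_dvd hd (Nat.dvd_of_mod_eq_zero hdvd)
        have hpd : d = m.minFac := by omega
        have hnp : ¬ Nat.Prime m := by
          intro hp
          have hfm := hp.minFac_eq
          have hdm : d = m := by omega
          subst hdm
          nlinarith [hdd, hm]
        subst hpd
        by_cases h1' : stripFactor m m.minFac = 1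
        · simp [pvBres, hdvd, h1', hm, hnp]
        · have hpos := stripFactor_pos m m.minFac (by omega)
          have hm2 : 2 ≤ stripFactor m m.minFac := by omega
          have hspf := spfFrom_eq_minFac (stripFactor m m.minFac) hm2
            (stripFactor m m.minFac + 2) 2 (by omega) (by omega)
            (Nat.minFac_prime (by omega)).two_le
          simp [pvBres, hdvd, h1', hm, hnp, hspf]
      · have hne : d ≠ m.minFac := by
          intro h
          exact hdvd ((Nat.dvd_iff_mod_eq_zero).mp (h ▸ Nat.minFac_dvd m))
        simp only [hdvd, beq_iff_eq, if_false]
        exact ih (d + 1) (by omega) (by omega) (by omega)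
    · rename_i hdd
      have hp : Nat.Prime m := by
        by_contra hp
        have h2 := Nat.minFac_sq_le_self (show 0 < m by omega) hp
        have h3 : d * d ≤ m.minFac * m.minFac := Nat.mul_le_mul hle hle
        have h4 : m.minFac * m.minFac ≤ m := by rwa [← pow_two]
        omega
      simp [pvBres, hp]

theorem par_num_primos_eq_alt (n : Int) : par_num_primos n = par_num_primos_alt n := by
  unfold par_num_primos par_num_primos_alt
  rw [parLoop_zero]
  by_cases hn2 : n < 2
  · rw [PySem.List.pyRange_one_eq_nil (by omega), if_pos hn2]
    rfl
  · rw [if_neg hn2]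
    by_cases hn3 : n = 2
    · subst hn3
      rw [PySem.List.pyRange_one_eq_nil (by omega)]
      rw [show ((2:Int).toNat) = 2 from rfl, outerLoop]
      norm_num
    · have hn : 3 ≤ n := by omega
      have hN : 2 ≤ n.toNat := by omega
      rw [outerLoop_eq n.toNat hN (n.toNat + 2) 2 (by omega) (by omega)
        (Nat.minFac_prime (by omega)).two_le]
      unfold pvBres
      by_cases hp : Nat.Prime n.toNat
      · rw [if_neg (by simp [hp])]
        have hF : (PySem.List.pyRange 2 n 1).filter (pvPred n) = [] := by
          rw [List.filter_eq_nil_iff]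
          intro i hi hpred
          rw [PySem.List.mem_pyRange_one] at hi
          rw [pvPred_iff n i (by omega) (by omega)] at hpred
          obtain ⟨hip, hid⟩ := hpred
          rcases hp.eq_one_or_self_of_dvd _ hid with h | h
          · exact absurd h hip.one_lt.ne'
          · omega
        rw [hF]
      · rw [if_pos ⟨hN, hp⟩]
        have hpp : Nat.Prime n.toNat.minFac := Nat.minFac_prime (by omega)
        have hpdvd : n.toNat.minFac ∣ n.toNat := Nat.minFac_dvd _
        have hp2 : 2 ≤ n.toNat.minFac := hpp.two_le
        have hplt : n.toNat.minFac < n.toNat :=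
          lt_of_le_of_ne (Nat.minFac_le (by omega)) (fun h => hp (h ▸ hpp))
        have hm'dvd : stripFactor n.toNat n.toNat.minFac ∣ n.toNat := stripFactor_dvd _ _
        have hm'pos : 1 ≤ stripFactor n.toNat n.toNat.minFac := stripFactor_pos _ _ (by omega)
        have hpnd : ¬ n.toNat.minFac ∣ stripFactor n.toNat n.toNat.minFac :=
          stripFactor_not_dvd _ _ hp2 (by omega)
        by_cases h1 : stripFactor n.toNat n.toNat.minFac = 1
        · rw [if_pos h1]
          have hall : ∀ i ∈ (PySem.List.pyRange 2 n 1).filter (pvPred n),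
              i = (n.toNat.minFac : Int) := by
            intro i hi
            rw [List.mem_filter, PySem.List.mem_pyRange_one] at hi
            obtain ⟨⟨hi1, hi2⟩, hi3⟩ := hi
            rw [pvPred_iff n i (by omega) (by omega)] at hi3
            obtain ⟨hip, hid⟩ := hi3
            have heq : i.toNat = n.toNat.minFac := by
              by_contra hne
              have hdm' : i.toNat ∣ stripFactor n.toNat n.toNat.minFac :=
                dvd_stripFactor _ _ _ hip hpp hne hid
              rw [h1, Nat.dvd_one] at hdm'
              exact absurd hdm' hip.one_lt.ne'
            omega
          have hnd : ((PySem.List.pyRange 2 n 1).filter (pvPred n)).Nodup :=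
            (PySem.List.nodup_pyRange_one 2 n).filter _
          cases hf : (PySem.List.pyRange 2 n 1).filter (pvPred n) with
          | nil => rfl
          | cons a t =>
            cases t with
            | nil => rfl
            | cons b t2 =>
              exfalso
              rw [hf] at hall hnd
              have ha := hall a (by simp)
              have hb := hall b (by simp)
              rw [List.nodup_cons] at hnd
              exact hnd.1 (by simp [ha, hb])
        · rw [if_neg h1]
          have hm'2 : 2 ≤ stripFactor n.toNat n.toNat.minFac := by omega
          have hqp : Nat.Prime (stripFactor n.toNat n.toNat.minFac).minFac :=
            Nat.minFac_prime (by omega)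
          have hq2 : 2 ≤ (stripFactor n.toNat n.toNat.minFac).minFac := hqp.two_le
          have hqdm' : (stripFactor n.toNat n.toNat.minFac).minFac ∣
              stripFactor n.toNat n.toNat.minFac := Nat.minFac_dvd _
          have hqdn : (stripFactor n.toNat n.toNat.minFac).minFac ∣ n.toNat :=
            hqdm'.trans hm'dvd
          have hqnep : (stripFactor n.toNat n.toNat.minFac).minFac ≠ n.toNat.minFac :=
            by intro h; apply hpnd; have hx := hqdm'; rw [h] at hx; exact hx
          have hpq : n.toNat.minFac < (stripFactor n.toNat n.toNat.minFac).minFac :=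
            lt_of_le_of_ne (Nat.minFac_le_of_dvd hq2 hqdn) (Ne.symm hqnep)
          have hm'lt : stripFactor n.toNat n.toNat.minFac < n.toNat := by
            rcases eq_or_lt_of_le (Nat.le_of_dvd (by omega) hm'dvd) with h | h
            · exact absurd (show n.toNat.minFac ∣ stripFactor n.toNat n.toNat.minFac by rw [h]; exact hpdvd) hpnd
            · exact h
          have hqlt : (stripFactor n.toNat n.toNat.minFac).minFac < n.toNat :=
            lt_of_le_of_lt (Nat.minFac_le (by omega)) hm'lt
          have hsplit : PySem.List.pyRange 2 n 1 =
              PySem.List.pyRange 2 (n.toNat.minFac : Int) 1 ++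
              ((n.toNat.minFac : Int) ::
                (PySem.List.pyRange ((n.toNat.minFac : Int) + 1)
                    ((stripFactor n.toNat n.toNat.minFac).minFac : Int) 1 ++
                 ((stripFactor n.toNat n.toNat.minFac).minFac : Int) ::
                  PySem.List.pyRange (((stripFactor n.toNat n.toNat.minFac).minFac : Int) + 1) n 1)) := by
            rw [PySem.List.pyRange_one_append 2 (n.toNat.minFac : Int) n (by omega) (by omega),
              PySem.List.pyRange_one_cons (show (n.toNat.minFac : Int) < n by omega),
              PySem.List.pyRange_one_append ((n.toNat.minFac : Int) + 1)
                ((stripFactor n.toNat n.toNat.minFac).minFac : Int) n (by omega) (by omega),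
              PySem.List.pyRange_one_cons
                (show ((stripFactor n.toNat n.toNat.minFac).minFac : Int) < n by omega)]
          rw [hsplit]
          have hz1 : (PySem.List.pyRange 2 (n.toNat.minFac : Int) 1).filter (pvPred n) = [] := by
            rw [List.filter_eq_nil_iff]
            intro i hi hpred
            rw [PySem.List.mem_pyRange_one] at hi
            rw [pvPred_iff n i (by omega) (by omega)] at hpred
            have := Nat.minFac_le_of_dvd (by omega : 2 ≤ i.toNat) hpred.2
            omega
          have hz2 : (PySem.List.pyRange ((n.toNat.minFac : Int) + 1)
              ((stripFactor n.toNat n.toNat.minFac).minFac : Int) 1).filter (pvPred n) = [] := by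
            rw [List.filter_eq_nil_iff]
            intro i hi hpred
            rw [PySem.List.mem_pyRange_one] at hi
            rw [pvPred_iff n i (by omega) (by omega)] at hpred
            obtain ⟨hip, hid⟩ := hpred
            have hne : i.toNat ≠ n.toNat.minFac := by omega
            have hdm' : i.toNat ∣ stripFactor n.toNat n.toNat.minFac :=
              dvd_stripFactor _ _ _ hip hpp hne hid
            have := Nat.minFac_le_of_dvd hip.two_le hdm'
            omega
          have hpt : pvPred n (n.toNat.minFac : Int) = true := by
            rw [pvPred_iff n _ (by omega) (by omega), Int.toNat_natCast]
            exact ⟨hpp, hpdvd⟩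
          have hqt : pvPred n ((stripFactor n.toNat n.toNat.minFac).minFac : Int) = true := by
            rw [pvPred_iff n _ (by omega) (by omega), Int.toNat_natCast]
            exact ⟨hqp, hqdn⟩
          rw [List.filter_append, hz1, List.filter_cons_of_pos hpt, List.filter_append, hz2,
            List.filter_cons_of_pos hqt]
          rfl

-- ===== VERDICT (by name: the statement is the Claim_ definition above) =====
theorem par_num_primos_spec : Claim_equal_par_num_primos := by
  intro n _
  unfold Spec_par_num_primos
  exact par_num_primos_eq_alt n
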